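-- pv_equiv track=rewrite | github.com/Shah-Afraz411/Generalized-Traceability-Solution-for-Hierarchical-Relationships | services/relationship_service.py | fetch_upward
-- ===== SOURCE A (Python) =====
-- from typing import Dict, List, Set
-- from collections import defaultdict
--
-- def fetch_upward(graph: Dict[str, List[str]], element_id: str, levels: int) -> Dict[str, List[str]]:
--     result = defaultdict(list)
--     queue = [(element_id, 0)]
--     visited = set()
--
--     while queue:
--         current, current_level = queue.pop(0)
--         if current_level >= levels:
--             break
--         for parent, children in graph.items():
--             if current in children and parent not in visited:
--                 visited.add(parent)
--                 result[current_level].append(parent)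
--                 queue.append((parent, current_level + 1))
--
--     return result
-- ===== SOURCE B (Python) =====
-- from collections import defaultdict, deque
--
-- def fetch_upward(graph, element_id, levels):
--     # Precompute reverse adjacency (child -> parents, in dict order, one entry per edge)
--     rev = {}
--     for parent, children in graph.items():
--         for child in dict.fromkeys(children):
--             rev.setdefault(child, []).append(parent)
--
--     result = defaultdict(list)
--     visited = set()
--     queue = deque([(element_id, 0)])
--     while queue:
--         current, current_level = queue.popleft()
--         if current_level >= levels:
--             break
--         for parent in rev.get(current, []):
--             if parent not in visited:
--                 visited.add(parent)
--                 result[current_level].append(parent)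
--                 queue.append((parent, current_level + 1))
--     return result
-- ===== Notes on version B (the rewrite author's own statement) =====
-- stated objective: alternative
-- what changed: B builds a reverse child-to-parents adjacency index once and each BFS pop looks up its parents directly, instead of A's rescan of every (parent, children) item of the graph per dequeued node.
import Mathlib
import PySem

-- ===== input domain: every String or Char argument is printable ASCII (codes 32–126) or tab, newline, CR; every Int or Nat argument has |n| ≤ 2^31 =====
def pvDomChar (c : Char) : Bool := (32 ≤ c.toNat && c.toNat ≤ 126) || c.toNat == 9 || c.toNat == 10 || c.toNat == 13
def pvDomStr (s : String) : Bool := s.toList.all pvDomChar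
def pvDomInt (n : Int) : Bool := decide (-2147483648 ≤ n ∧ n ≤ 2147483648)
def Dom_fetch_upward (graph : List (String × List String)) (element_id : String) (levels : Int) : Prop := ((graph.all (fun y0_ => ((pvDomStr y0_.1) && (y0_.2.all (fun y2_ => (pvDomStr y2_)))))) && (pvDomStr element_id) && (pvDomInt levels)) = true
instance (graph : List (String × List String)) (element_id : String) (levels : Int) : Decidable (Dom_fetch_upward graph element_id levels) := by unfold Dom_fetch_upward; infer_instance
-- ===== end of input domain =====

-- B replaces A's per-node rescan of every (parent, children) item with a reverse child→parents
-- index built once, so each BFS pop looks its parents up directly instead of rescanning the adjacency items (objective: alternative).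

-- ===== PORT A =====
-- One pop's body: 'for parent, children in graph.items(): if current in children and parent not in visited: …'
-- state = (visited, result, queue-after-the-pop)
def fetchUpA_scan (graph : List (String × List String)) (cur : String) (lvl : Int)
    (st : PySem.Set String × PySem.Dict Int (List String) × List (String × Int)) :
    PySem.Set String × PySem.Dict Int (List String) × List (String × Int) :=
  graph.foldl (fun st pc =>
    if pc.2.contains cur && !(PySem.Set.contains st.1 pc.1) then
      (PySem.Set.add st.1 pc.1, st.2.1.modify lvl [] (· ++ [pc.1]), st.2.2 ++ [(pc.1, lvl + 1)])
    else st) st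

-- 'while queue: current, current_level = queue.pop(0); if current_level >= levels: break; …'
-- fuel = graph.length + 1 bounds the number of pops: every queue push adds a previously
-- unvisited graph key to visited, so pushes ≤ graph.length and pops ≤ graph.length + 1.
def fetchUpA_loop (graph : List (String × List String)) (levels : Int) :
    Nat → List (String × Int) → PySem.Set String → PySem.Dict Int (List String) →
    PySem.Dict Int (List String)
  | 0, _, _, res => res
  | _ + 1, [], _, res => res
  | fuel + 1, (cur, lvl) :: rest, vis, res =>
    if lvl ≥ levels then res
    else
      let st := fetchUpA_scan graph cur lvl (vis, res, rest)
      fetchUpA_loop graph levels fuel st.2.2 st.1 st.2.1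

def fetch_upward (graph : List (String × List String)) (element_id : String) (levels : Int) :
    List (Int × List String) :=
  (fetchUpA_loop graph levels (graph.length + 1) [(element_id, 0)] PySem.Set.empty
    PySem.Dict.empty).items

-- ===== PORT B =====
-- 'for parent, children in graph.items(): for child in dict.fromkeys(children): rev.setdefault(child, []).append(parent)'
def fetchUpB_rev (graph : List (String × List String)) : PySem.Dict String (List String) :=
  graph.foldl (fun d pc =>
    (PySem.List.dedup pc.2).foldl (fun d c => d.modify c [] (· ++ [pc.1])) d) PySem.Dict.empty

-- 'while queue: current, current_level = queue.popleft(); …; for parent in rev.get(current, []): …'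
def fetchUpB_loop (rev : PySem.Dict String (List String)) (levels : Int) :
    Nat → List (String × Int) → PySem.Set String → PySem.Dict Int (List String) →
    PySem.Dict Int (List String)
  | 0, _, _, res => res
  | _ + 1, [], _, res => res
  | fuel + 1, (cur, lvl) :: rest, vis, res =>
    if lvl ≥ levels then res
    else
      let st := (rev.getD cur []).foldl (fun st p =>
        if !(PySem.Set.contains st.1 p) then
          (PySem.Set.add st.1 p, st.2.1.modify lvl [] (· ++ [p]), st.2.2 ++ [(p, lvl + 1)])
        else st) (vis, res, rest)
      fetchUpB_loop rev levels fuel st.2.2 st.1 st.2.1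

def fetch_upward_alt (graph : List (String × List String)) (element_id : String) (levels : Int) :
    List (Int × List String) :=
  (fetchUpB_loop (fetchUpB_rev graph) levels (graph.length + 1) [(element_id, 0)] PySem.Set.empty
    PySem.Dict.empty).items

-- ===== PRECONDITION & SPEC =====
def Spec_fetch_upward (graph : List (String × List String)) (element_id : String) (levels : Int) (out : List (Int × List String)) : Prop := out = fetch_upward_alt graph element_id levels
instance (graph : List (String × List String)) (element_id : String) (levels : Int) (out : List (Int × List String)) : Decidable (Spec_fetch_upward graph element_id levels out) := by unfold Spec_fetch_upward; infer_instance

-- ===== CLAIM (what is proved, stated in full; the proofs are below) =====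
def Claim_equal_fetch_upward : Prop := ∀ (graph : List (String × List String)) (element_id : String) (levels : Int), Dom_fetch_upward graph element_id levels → Spec_fetch_upward graph element_id levels (fetch_upward graph element_id levels)

-- ===== LEMMAS AND PROOFS =====

-- One (parent, children) item contributes parent once to rev[c] iff c ∈ children.
theorem fetchUp_rev_inner (cs : List String) (p c : String)
    (d : PySem.Dict String (List String)) :
    ((PySem.List.dedup cs).foldl (fun d c' => d.modify c' [] (· ++ [p])) d).getD c []
      = d.getD c [] ++ (if cs.contains c then [p] else []) := by
  have h1 : (PySem.List.dedup cs).foldl (fun d c' => d.modify c' [] (· ++ [p])) d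
      = ((PySem.List.dedup cs).map (fun c' => (c', p))).foldl
          (fun d q => d.modify q.1 [] (· ++ [q.2])) d := by
    rw [List.foldl_map]
  rw [h1, PySem.Dict.getD_foldl_modify_append]
  congr 1
  rw [List.filter_map]
  have h2 : (fun q => q.1 == c) ∘ (fun c' : String => (c', p)) = fun c' => c' == c := rfl
  rw [h2, List.filter_beq]
  by_cases hc : c ∈ cs
  · have hcount : (PySem.List.dedup cs).count c = 1 := by
      have hpos := List.count_pos_iff.mpr ((PySem.List.mem_dedup cs c).mpr hc)
      have hle := List.nodup_iff_count_le_one.mp (PySem.List.nodup_dedup cs) c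
      omega
    rw [hcount]
    simp [hc]
  · have hcount : (PySem.List.dedup cs).count c = 0 :=
      List.count_eq_zero.mpr (fun h => hc ((PySem.List.mem_dedup cs c).mp h))
    rw [hcount]
    simp [hc]

-- rev[c] is exactly the parents whose children list contains c, in graph order.
theorem fetchUp_rev_getD_aux (graph : List (String × List String))
    (d : PySem.Dict String (List String)) (c : String) :
    (graph.foldl (fun d pc =>
        (PySem.List.dedup pc.2).foldl (fun d c' => d.modify c' [] (· ++ [pc.1])) d) d).getD c []
      = d.getD c [] ++ (graph.filter (fun pc => pc.2.contains c)).map Prod.fst := by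
  induction graph generalizing d with
  | nil => simp
  | cons pc t ih =>
    simp only [List.foldl_cons, List.filter_cons]
    rw [ih, fetchUp_rev_inner]
    by_cases h : c ∈ pc.2 <;> simp [h]

theorem fetchUp_rev_getD (graph : List (String × List String)) (c : String) :
    (fetchUpB_rev graph).getD c []
      = (graph.filter (fun pc => pc.2.contains c)).map Prod.fst := by
  unfold fetchUpB_rev
  rw [fetchUp_rev_getD_aux]
  simp [PySem.Dict.getD_empty]

-- A's rescan of the whole graph equals B's fold over the reverse-index entry.
theorem fetchUp_scan_eq (graph : List (String × List String)) (cur : String) (lvl : Int)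
    (st : PySem.Set String × PySem.Dict Int (List String) × List (String × Int)) :
    fetchUpA_scan graph cur lvl st
      = ((graph.filter (fun pc => pc.2.contains cur)).map Prod.fst).foldl (fun st p =>
          if !(PySem.Set.contains st.1 p) then
            (PySem.Set.add st.1 p, st.2.1.modify lvl [] (· ++ [p]), st.2.2 ++ [(p, lvl + 1)])
          else st) st := by
  induction graph generalizing st with
  | nil => simp [fetchUpA_scan]
  | cons pc t ih =>
    simp only [fetchUpA_scan, List.foldl_cons, List.filter_cons] at ih ⊢
    by_cases h : pc.2.contains cur = true
    · rw [if_pos h, List.map_cons, List.foldl_cons, ih]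
      congr 1
      rw [h]
      simp only [Bool.true_and]
    · have h' : pc.2.contains cur = false := by
        exact Bool.eq_false_iff.mpr (fun hh => h hh)
      rw [if_neg h, ih]
      congr 1
      rw [h']
      simp

theorem fetchUp_loop_eq (graph : List (String × List String)) (levels : Int) :
    ∀ (fuel : Nat) (queue : List (String × Int)) (vis : PySem.Set String)
      (res : PySem.Dict Int (List String)),
      fetchUpA_loop graph levels fuel queue vis res
        = fetchUpB_loop (fetchUpB_rev graph) levels fuel queue vis res := by
  intro fuel
  induction fuel with
  | zero => intro queue vis res; rfl
  | succ f ih =>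
    intro queue vis res
    cases queue with
    | nil => rfl
    | cons hd rest =>
      obtain ⟨cur, lvl⟩ := hd
      simp only [fetchUpA_loop, fetchUpB_loop]
      by_cases hlt : lvl ≥ levels
      · simp [hlt]
      · simp only [hlt, if_false]
        rw [fetchUp_scan_eq, fetchUp_rev_getD graph cur]
        exact ih _ _ _

-- ===== VERDICT (by name: the statement is the Claim_ definition above) =====
theorem fetch_upward_spec : Claim_equal_fetch_upward := by
  intro graph element_id levels _
  unfold Spec_fetch_upward fetch_upward fetch_upward_alt
  rw [fetchUp_loop_eq]
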